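-- pv_equiv track=rewrite | github.com/casperfibaek/buteo | buteo/utils.py | divide_steps
-- ===== SOURCE A (Python) =====
-- def divide_steps(total, step):
--     steps = []
--     remainder = total % step
--     divided = int(total / step)
--     for _ in range(step):
--         if remainder > 0:
--             steps.append(divided + 1)
--             remainder -= 1
--         else:
--             steps.append(divided)
--
--     return steps
-- ===== SOURCE B (Python) =====
-- def divide_steps(total, step):
--     remainder = total % step
--     divided = int(total / step)
--
--     def boundary(i):
--         # cumulative amount allocated to the first i portions
--         return divided * i + min(i, remainder)
--
--     return [boundary(i + 1) - boundary(i) for i in range(step)]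
-- ===== Notes on version B (the rewrite author's own statement) =====
-- stated objective: alternative
-- what changed: Replaces A's stateful loop (a mutable remainder counter decremented per appended element) by the cumulative-boundary method: a monotone allocation function boundary(i) = divided*i + min(i, remainder) gives the total assigned to the first i portions, and each portion is computed statelessly as boundary(i+1) - boundary(i).
import Mathlib
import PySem

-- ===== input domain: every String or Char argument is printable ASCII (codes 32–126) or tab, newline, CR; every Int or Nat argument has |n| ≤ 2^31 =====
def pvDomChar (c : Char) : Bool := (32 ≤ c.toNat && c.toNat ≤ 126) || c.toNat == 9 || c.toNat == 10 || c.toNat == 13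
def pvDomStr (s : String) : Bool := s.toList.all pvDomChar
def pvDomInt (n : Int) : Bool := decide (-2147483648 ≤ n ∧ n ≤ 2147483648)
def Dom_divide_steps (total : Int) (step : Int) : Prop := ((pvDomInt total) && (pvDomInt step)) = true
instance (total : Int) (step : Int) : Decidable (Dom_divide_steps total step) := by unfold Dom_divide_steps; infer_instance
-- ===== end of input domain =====

-- B computes each portion statelessly as a difference of a cumulative allocation function
-- boundary(i) = divided*i + min(i, remainder), instead of A's loop with a decremented counter
-- (objective: alternative).

-- ===== PORT A =====
-- int(total / step) truncates toward zero; on Dom (|total|, |step| ≤ 2^31) the float quotient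
-- rounds to something that truncates identically, so Int.tdiv is exact here.
def divide_steps (total : Int) (step : Int) : List Int :=
  let remainder := PySem.Int.mod total step
  let divided := Int.tdiv total step
  ((PySem.List.pyRange 0 step 1).foldl
    (fun (st : List Int × Int) _ =>
      if st.2 > 0 then (st.1 ++ [divided + 1], st.2 - 1) else (st.1 ++ [divided], st.2))
    ([], remainder)).1

-- ===== PORT B =====
def divide_steps_alt (total : Int) (step : Int) : List Int :=
  let remainder := PySem.Int.mod total step
  let divided := Int.tdiv total step
  let boundary := fun (i : Int) => divided * i + min i remainder
  (PySem.List.pyRange 0 step 1).map (fun i => boundary (i + 1) - boundary i)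

-- ===== PRECONDITION & SPEC =====
-- Pre_ excludes step = 0, on which Python's '%' raises ZeroDivisionError.
def Pre_divide_steps (_total : Int) (step : Int) : Prop := step ≠ 0
instance (total : Int) (step : Int) : Decidable (Pre_divide_steps total step) := by unfold Pre_divide_steps; infer_instance
def pvWitness_divide_steps : Int × Int := (10, 3)

def Spec_divide_steps (total : Int) (step : Int) (out : List Int) : Prop := out = divide_steps_alt total step
instance (total : Int) (step : Int) (out : List Int) : Decidable (Spec_divide_steps total step out) := by unfold Spec_divide_steps; infer_instance

-- ===== CLAIM (what is proved, stated in full; the proofs are below) =====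
def Claim_equal_divide_steps : Prop := ∀ (total : Int) (step : Int), Dom_divide_steps total step → Pre_divide_steps total step → Spec_divide_steps total step (divide_steps total step)

-- ===== LEMMAS AND PROOFS =====

-- A's loop over a list of length n, starting from accumulator acc and counter r with
-- 0 ≤ r ≤ n, appends r copies of d+1 and then n - r copies of d.
theorem divide_steps_loop (d : Int) : ∀ (l : List Int) (acc : List Int) (r : Int),
    0 ≤ r → r.toNat ≤ l.length →
    (l.foldl
      (fun (st : List Int × Int) _ =>
        if st.2 > 0 then (st.1 ++ [d + 1], st.2 - 1) else (st.1 ++ [d], st.2))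
      (acc, r)).1
    = acc ++ List.replicate r.toNat (d + 1) ++ List.replicate (l.length - r.toNat) d := by
  intro l
  induction l with
  | nil =>
    intro acc r h0 hle
    have : r.toNat = 0 := by simp at hle; omega
    simp [this]
  | cons a t ih =>
    intro acc r h0 hle
    by_cases hr : r > 0
    · simp only [List.foldl_cons, if_pos hr]
      rw [ih (acc ++ [d + 1]) (r - 1) (by omega) (by simp at hle ⊢; omega)]
      have h1 : r.toNat = (r - 1).toNat + 1 := by omega
      have h2 : (a :: t).length - r.toNat = t.length - (r - 1).toNat := by
        simp; omega
      rw [h1]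
      have h3 : (a :: t).length - ((r - 1).toNat + 1) = t.length - (r - 1).toNat := by
        simp
      rw [List.replicate_succ]
      simp
    · simp only [List.foldl_cons, if_neg hr]
      have hr0 : r = 0 := by omega
      subst hr0
      rw [ih (acc ++ [d]) 0 le_rfl (by simp)]
      simp [List.replicate_succ]

-- B's boundary-difference map over range(step) equals the block form, for 0 ≤ r ≤ step.
theorem divide_steps_map (d r step : Int) (h0 : 0 ≤ r) (hle : r ≤ step) :
    (PySem.List.pyRange 0 step 1).map
      (fun i => (d * (i + 1) + min (i + 1) r) - (d * i + min i r))
    = List.replicate r.toNat (d + 1) ++ List.replicate (step - r).toNat d := by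
  apply List.ext_getElem
  · rw [List.length_map, PySem.List.length_pyRange_one, List.length_append,
        List.length_replicate, List.length_replicate]
    omega
  · intro k h1 h2
    have hk : (k : Int) < step := by
      rw [List.length_map, PySem.List.length_pyRange_one] at h1; omega
    rw [List.getElem_map, PySem.List.getElem_pyRange_one]
    by_cases hkr : (k : Int) < r
    · rw [List.getElem_append_left (by rw [List.length_replicate]; omega)]
      simp only [List.getElem_replicate]
      have hmin1 : min ((0 : Int) + k + 1) r = (0 : Int) + k + 1 := by omega
      have hmin2 : min ((0 : Int) + (k : Int)) r = (0 : Int) + k := by omega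
      rw [hmin1, hmin2]; ring
    · rw [List.getElem_append_right (by rw [List.length_replicate]; omega)]
      simp only [List.getElem_replicate]
      have hmin1 : min ((0 : Int) + k + 1) r = r := by omega
      have hmin2 : min ((0 : Int) + (k : Int)) r = r := by omega
      rw [hmin1, hmin2]; ring

-- ===== VERDICT (by name: the statement is the Claim_ definition above) =====
theorem divide_steps_spec : Claim_equal_divide_steps := by
  intro total step _ hpre
  unfold Spec_divide_steps divide_steps divide_steps_alt
  simp only []
  set r := PySem.Int.mod total step with hr
  set d := Int.tdiv total step
  rcases lt_or_gt_of_ne hpre with hneg | hpos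
  · have h1 : PySem.List.pyRange 0 step 1 = [] := PySem.List.pyRange_one_eq_nil (by omega)
    rw [h1]; rfl
  · have h0 : 0 ≤ r := PySem.Int.mod_nonneg (a := total) hpos
    have hlt : r < step := PySem.Int.mod_lt (a := total) hpos
    rw [divide_steps_loop d _ [] r h0
      (by rw [PySem.List.length_pyRange_one]; omega)]
    rw [PySem.List.length_pyRange_one]
    have h3 : (step - 0).toNat - r.toNat = (step - r).toNat := by omega
    rw [h3, divide_steps_map d r step h0 (by omega)]
    simp
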